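-- pv_equiv track=rewrite | github.com/BruceHenry/vacuum | agent-performance-test.py | vacuum
-- ===== SOURCE A (Python) =====
-- def vacuum(env, location):
--     step_count = 0
--     # Decide which direction to go. 1 means right, and -1 means left.
--     if location < len(env) / 2:
--         direction = -1
--     else:
--         direction = 1
--     # First round to one end
--     while True:
--         if sense_dirt(env[location]):
--             # suck(location)
--             step_count += 1
--             env[location] = 0
--         location += direction
--         if location == -1 or location == len(env):
--             break
--         # move(direction, location)
--         step_count += 1
--     # Turn around
--     direction = - direction
--     location += direction
--     while True:
--         if sense_dirt(env[location]):
--             # suck(location)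
--             step_count += 1
--             env[location] = 0
--         location += direction
--         if location == -1 or location == len(env):
--             break
--         # move(direction, location)
--         step_count += 1
--     return step_count
--
-- def sense_dirt(status):
--     if int(status) == 0:
--         return False
--     else:
--         return True
-- ===== SOURCE B (Python) =====
-- def vacuum(env, location):
--     # One pass: count and clean every dirty cell, then derive the move count in
--     # closed form from the direction rule (mutates env exactly like the original).
--     n = len(env)
--     if not 0 <= location < n:
--         # the walk starts at env[location]; a start off the list is an IndexError
--         raise IndexError('list index out of range')
--     dirty = 0
--     for i in range(n):
--         if int(env[i]) != 0:
--             dirty += 1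
--             env[i] = 0
--     if location < n / 2:
--         moves = location + (n - 1)
--     else:
--         moves = (n - 1 - location) + (n - 1)
--     return dirty + moves
-- ===== Notes on version B (the rewrite author's own statement) =====
-- stated objective: simpler
-- what changed: Replaces A's two-direction step-by-step walk simulation with a single cleaning pass plus a closed-form move count derived from the direction rule; Pre_ excludes only inputs where both raise IndexError (empty env or location outside [0, len(env))).
import Mathlib
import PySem

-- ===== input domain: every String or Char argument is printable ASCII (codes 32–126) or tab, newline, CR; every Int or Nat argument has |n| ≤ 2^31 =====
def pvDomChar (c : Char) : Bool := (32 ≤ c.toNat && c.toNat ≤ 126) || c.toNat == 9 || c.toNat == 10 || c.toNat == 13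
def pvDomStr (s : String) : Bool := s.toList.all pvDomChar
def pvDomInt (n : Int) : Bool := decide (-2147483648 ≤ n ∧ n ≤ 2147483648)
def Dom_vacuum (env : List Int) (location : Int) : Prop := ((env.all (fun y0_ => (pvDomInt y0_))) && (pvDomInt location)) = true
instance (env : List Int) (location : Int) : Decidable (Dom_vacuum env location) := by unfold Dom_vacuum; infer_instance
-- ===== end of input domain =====

-- B makes one counting/cleaning pass and computes the move count in closed form,
-- instead of A's two step-by-step direction walks; equivalence is about the return
-- value (both Pythons zero env's cells in place identically).

-- ===== PORT A =====
-- sense_dirt(status): int(status) on an int is the identity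
def senseDirt (status : Int) : Bool := !(status == 0)

-- one 'while True' loop of A; fuel only makes the recursion total (A's loop
-- terminates on every input Pre_ admits, and fuel is chosen large enough there).
-- state/result: (env, location, step_count)
def vacuumLoop : Nat → List Int → Int → Int → Int → (List Int × Int × Int)
  | 0, env, loc, _, sc => (env, loc, sc)
  | fuel+1, env, loc, dir, sc =>
    let v := PySem.List.pyGetD env loc 0
    let env' := if senseDirt v then PySem.List.pySetD env loc 0 else env
    let sc' := if senseDirt v then sc + 1 else sc
    let loc' := loc + dir
    if loc' = -1 ∨ loc' = (env'.length : Int) then (env', loc', sc')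
    else vacuumLoop fuel env' loc' dir (sc' + 1)

def vacuum (env : List Int) (location : Int) : Int :=
  -- 'location < len(env) / 2' on ints is exactly '2*location < len(env)'
  let dir : Int := if 2 * location < (env.length : Int) then -1 else 1
  let r1 := vacuumLoop (env.length + 1) env location dir 0
  let dir2 := -dir
  let loc2 := r1.2.1 + dir2
  let r2 := vacuumLoop (env.length + 1) r1.1 loc2 dir2 r1.2.2
  r2.2.2

-- ===== PORT B =====
def vacuum_alt (env : List Int) (location : Int) : Int :=
  let dirty := env.foldl (fun acc x => if x ≠ 0 then acc + 1 else acc) (0 : Int)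
  let n : Int := env.length
  let moves := if 2 * location < n then location + (n - 1) else (n - 1 - location) + (n - 1)
  dirty + moves

-- ===== PRECONDITION & SPEC =====
-- Pre_ excludes exactly the inputs on which A raises IndexError: empty env, or a
-- starting location outside [0, len(env)) (A walks off the list there).
def Pre_vacuum (env : List Int) (location : Int) : Prop :=
  0 ≤ location ∧ location < (env.length : Int)
instance (env : List Int) (location : Int) : Decidable (Pre_vacuum env location) := by
  unfold Pre_vacuum; infer_instance

def pvWitness_vacuum : List Int × Int := ([3, 0, 7], 1)

def Spec_vacuum (env : List Int) (location : Int) (out : Int) : Prop := out = vacuum_alt env location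
instance (env : List Int) (location : Int) (out : Int) : Decidable (Spec_vacuum env location out) := by unfold Spec_vacuum; infer_instance

-- ===== CLAIM (what is proved, stated in full; the proofs are below) =====
def Claim_equal_vacuum : Prop := ∀ (env : List Int) (location : Int), Dom_vacuum env location → Pre_vacuum env location → Spec_vacuum env location (vacuum env location)

-- ===== LEMMAS AND PROOFS =====

-- dirty-cell count, literally B's fold
def cnt (l : List Int) : Int := l.foldl (fun acc x => if x ≠ 0 then acc + 1 else acc) 0

theorem foldl_cnt_shift (l : List Int) (s : Int) :
    l.foldl (fun acc x => if x ≠ 0 then acc + 1 else acc) s = s + cnt l := by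
  induction l generalizing s with
  | nil => simp [cnt]
  | cons x l ih =>
    simp only [List.foldl_cons, cnt] at *
    rw [ih, ih (if x ≠ 0 then 0 + 1 else 0)]
    split_ifs <;> ring

theorem cnt_append (a b : List Int) : cnt (a ++ b) = cnt a + cnt b := by
  simp only [cnt, List.foldl_append]
  exact foldl_cnt_shift b _

theorem cnt_cons (x : Int) (l : List Int) :
    cnt (x :: l) = (if x ≠ 0 then 1 else 0) + cnt l := by
  rw [show x :: l = [x] ++ l from rfl, cnt_append]
  have : cnt [x] = if x ≠ 0 then 1 else 0 := by simp only [cnt, List.foldl_cons, List.foldl_nil]; split_ifs <;> simp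
  rw [this]

theorem cnt_replicate (n : Nat) : cnt (List.replicate n 0) = 0 := by
  induction n with
  | zero => rfl
  | succ k ih => rw [List.replicate_succ, cnt_cons]; simp [ih]

-- rightward walk: starting at index |pre| of pre ++ cur :: suf with direction 1
theorem loopR (suf : List Int) : ∀ (pre : List Int) (cur sc : Int) (fuel : Nat),
    suf.length < fuel →
    vacuumLoop fuel (pre ++ cur :: suf) (pre.length : Int) 1 sc
      = (pre ++ List.replicate (suf.length + 1) 0,
         ((pre.length + suf.length + 1 : Nat) : Int),
         sc + cnt (cur :: suf) + suf.length) := by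
  induction suf with
  | nil =>
    intro pre cur sc fuel hf
    match fuel, hf with
    | f+1, _ =>
      have hget : PySem.List.pyGetD (pre ++ [cur]) ((pre.length : Nat) : Int) 0 = cur := by
        simp [PySem.List.pyGetD_natCast, List.getD]
      have henv : (if senseDirt cur then PySem.List.pySetD (pre ++ [cur]) ((pre.length : Nat) : Int) 0 else (pre ++ [cur])) = pre ++ [(0:Int)] := by
        by_cases h : cur = 0
        · simp [senseDirt, h]
        · simp [senseDirt, h, PySem.List.pySetD_natCast]
      simp only [vacuumLoop, hget, henv]
      have hcond : ((pre.length : Int) + 1 = -1 ∨ (pre.length : Int) + 1 = ((pre ++ [(0:Int)]).length : Int)) := by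
        right; simp
      rw [if_pos hcond]
      simp only [Prod.mk.injEq]
      refine ⟨rfl, by simp, ?_⟩
      have : cnt [cur] = if cur ≠ 0 then 1 else 0 := by
        simp only [cnt, List.foldl_cons, List.foldl_nil]; split_ifs <;> simp
      simp only [senseDirt, this]
      by_cases h : cur = 0 <;> simp [h]
  | cons c rest ih =>
    intro pre cur sc fuel hf
    match fuel, hf with
    | f+1, hf =>
      have hget : PySem.List.pyGetD (pre ++ cur :: c :: rest) ((pre.length : Nat) : Int) 0 = cur := by
        simp [PySem.List.pyGetD_natCast, List.getD]
      have henv : (if senseDirt cur then PySem.List.pySetD (pre ++ cur :: c :: rest) ((pre.length : Nat) : Int) 0 else (pre ++ cur :: c :: rest)) = pre ++ (0:Int) :: c :: rest := by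
        by_cases h : cur = 0
        · simp [senseDirt, h]
        · simp [senseDirt, h, PySem.List.pySetD_natCast]
      simp only [vacuumLoop, hget, henv]
      have hcond : ¬((pre.length : Int) + 1 = -1 ∨ (pre.length : Int) + 1 = ((pre ++ (0:Int) :: c :: rest).length : Int)) := by
        simp; omega
      rw [if_neg hcond]
      have hidx : (pre.length : Int) + 1 = (((pre ++ [(0:Int)]).length : Nat) : Int) := by simp
      have hre : pre ++ (0:Int) :: c :: rest = (pre ++ [(0:Int)]) ++ c :: rest := by simp
      rw [hidx, hre, ih (pre ++ [(0:Int)]) c _ f (by simpa using Nat.lt_of_succ_lt_succ hf)]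
      have hrep : (pre ++ [(0:Int)]) ++ List.replicate (rest.length + 1) 0 = pre ++ List.replicate (rest.length + 1 + 1) 0 := by
        rw [List.append_assoc]
        congr 1
      simp only [Prod.mk.injEq]
      refine ⟨by rw [hrep]; rfl, by simp; omega, ?_⟩
      rw [cnt_cons cur (c :: rest)]
      simp only [senseDirt]
      by_cases h : cur = 0 <;> simp [h] <;> ring

-- leftward walk: starting at index |pre| of pre ++ cur :: suf with direction -1
theorem loopL (pre : List Int) : ∀ (cur : Int) (suf : List Int) (sc : Int) (fuel : Nat),
    pre.length < fuel →
    vacuumLoop fuel (pre ++ cur :: suf) (pre.length : Int) (-1) sc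
      = (List.replicate (pre.length + 1) 0 ++ suf,
         -1,
         sc + cnt (pre ++ [cur]) + pre.length) := by
  induction pre using List.reverseRecOn with
  | nil =>
    intro cur suf sc fuel hf
    match fuel, hf with
    | f+1, _ =>
      have hget : PySem.List.pyGetD (cur :: suf) ((0:Int)) 0 = cur := by
        simp [PySem.List.pyGetD_zero_cons]
      have henv : (if senseDirt cur then PySem.List.pySetD (cur :: suf) (0:Int) 0 else (cur :: suf)) = (0:Int) :: suf := by
        by_cases h : cur = 0
        · simp [senseDirt, h]
        · have hs : PySem.List.pySetD (cur :: suf) (0:Int) 0 = (0:Int) :: suf := by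
            rw [show (0:Int) = ((0:Nat):Int) from rfl, PySem.List.pySetD_natCast]; rfl
          simp [senseDirt, h, hs]
      simp only [List.nil_append, List.length_nil, Nat.cast_zero, vacuumLoop, hget, henv]
      have hcond : ((0:Int) + -1 = -1 ∨ (0:Int) + -1 = (((0:Int) :: suf).length : Int)) := by left; ring
      rw [if_pos hcond]
      simp only [Prod.mk.injEq]
      refine ⟨by simp [List.replicate_succ], by ring, ?_⟩
      have : cnt [cur] = if cur ≠ 0 then 1 else 0 := by
        simp only [cnt, List.foldl_cons, List.foldl_nil]; split_ifs <;> simp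
      simp only [senseDirt, this]
      by_cases h : cur = 0 <;> simp [h]
  | append_singleton p x ih =>
    intro cur suf sc fuel hf
    match fuel, hf with
    | f+1, hf =>
      have hcast : ((p ++ [x]).length : Int) = (((p.length + 1 : Nat)) : Int) := by simp
      have hre0 : (p ++ [x]) ++ cur :: suf = p ++ x :: cur :: suf := by simp
      have hget : PySem.List.pyGetD (p ++ x :: cur :: suf) (((p.length + 1 : Nat)) : Int) 0 = cur := by
        rw [PySem.List.pyGetD_natCast]
        simp [List.getD]
      have henv : (if senseDirt cur then PySem.List.pySetD (p ++ x :: cur :: suf) (((p.length + 1 : Nat)) : Int) 0 else (p ++ x :: cur :: suf)) = p ++ x :: (0:Int) :: suf := by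
        by_cases h : cur = 0
        · rw [if_neg (by simp [senseDirt, h]), h]
        · have hs : PySem.List.pySetD (p ++ x :: cur :: suf) (((p.length + 1 : Nat)) : Int) 0 = p ++ x :: (0:Int) :: suf := by
            rw [PySem.List.pySetD_natCast]
            rw [show p ++ x :: cur :: suf = (p ++ [x]) ++ cur :: suf by simp]
            rw [show p.length + 1 = (p ++ [x]).length by simp]
            simp
          rw [if_pos (by simp [senseDirt, h] : senseDirt cur = true)]
          exact hs
      rw [hre0, hcast]
      simp only [vacuumLoop, hget, henv]
      have hcond : ¬((((p.length + 1 : Nat)) : Int) + -1 = -1 ∨ (((p.length + 1 : Nat)) : Int) + -1 = ((p ++ x :: (0:Int) :: suf).length : Int)) := by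
        simp; omega
      rw [if_neg hcond]
      have hidx : (((p.length + 1 : Nat)) : Int) + -1 = ((p.length : Nat) : Int) := by push_cast; ring
      rw [hidx, ih x ((0:Int) :: suf) _ f (by simp at hf ⊢; omega)]
      simp only [Prod.mk.injEq]
      refine ⟨?_, by trivial, ?_⟩
      · rw [show List.replicate (p.length + 1) (0:Int) ++ (0:Int) :: suf = (List.replicate (p.length + 1) (0:Int) ++ [(0:Int)]) ++ suf by simp,
            ← List.replicate_succ']
        simp
      · rw [show (p ++ [x]) ++ [cur] = p ++ [x] ++ [cur] from rfl]
        rw [cnt_append (p ++ [x]) [cur]]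
        have hcur : cnt [cur] = if cur ≠ 0 then 1 else 0 := by
          simp only [cnt, List.foldl_cons, List.foldl_nil]; split_ifs <;> simp
        simp only [senseDirt, hcur]
        by_cases h : cur = 0 <;> simp [h] <;> ring

-- ===== VERDICT (by name: the statement is the Claim_ definition above) =====
theorem cnt_singleton (x : Int) : cnt [x] = if x ≠ 0 then 1 else 0 := by
  simp only [cnt, List.foldl_cons, List.foldl_nil]; split_ifs <;> simp

theorem vacuum_spec : Claim_equal_vacuum := by
  intro env location _ hpre
  obtain ⟨h0, hn⟩ := hpre
  unfold Spec_vacuum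
  set l : Nat := location.toNat with hl
  have hloc : location = (l : Int) := (Int.toNat_of_nonneg h0).symm
  have hlt : l < env.length := by omega
  set pre : List Int := env.take l with hpreDef
  set cur : Int := env[l] with hcurDef
  set suf : List Int := env.drop (l + 1) with hsufDef
  have hdecomp : env = pre ++ cur :: suf := by
    rw [hpreDef, hcurDef, hsufDef]
    rw [show env[l] :: List.drop (l + 1) env = List.drop l env from List.getElem_cons_drop hlt]
    exact (List.take_append_drop l env).symm
  have hprelen : pre.length = l := by
    rw [hpreDef]; simp [Nat.min_eq_left (Nat.le_of_lt hlt)]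
  have hlen : env.length = l + 1 + suf.length := by
    rw [hsufDef]; simp [List.length_drop]; omega
  have hcntenv : cnt env = cnt pre + cnt [cur] + cnt suf := by
    rw [hdecomp, cnt_append, show cur :: suf = [cur] ++ suf from rfl, cnt_append]; ring
  have halt : vacuum_alt env location
      = cnt env + (if 2 * location < (env.length : Int) then location + ((env.length : Int) - 1) else ((env.length : Int) - 1 - location) + ((env.length : Int) - 1)) := by
    simp only [vacuum_alt, cnt]
  rw [halt]
  by_cases hdir : 2 * location < (env.length : Int)
  · -- direction -1 : left first
    simp only [vacuum]
    rw [if_pos hdir, if_pos hdir]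
    have hfuel1 : pre.length < env.length + 1 := by omega
    rw [hdecomp, hloc] at hdir ⊢
    rw [show ((l : Nat) : Int) = ((pre.length : Nat) : Int) by rw [hprelen]]
    rw [loopL pre cur suf 0 _ (by simp)]
    have e1 : List.replicate (pre.length + 1) (0:Int) ++ suf
        = [] ++ (0:Int) :: (List.replicate pre.length 0 ++ suf) := by
      simp [List.replicate_succ]
    have e3 : (- -(1:Int)) = 1 := by norm_num
    simp only [e3]
    rw [show ((-1:Int) + 1) = ((List.length ([] : List Int) : Nat) : Int) by simp]
    rw [e1]
    rw [loopR (List.replicate pre.length 0 ++ suf) [] 0 _ _ (by simp)]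
    have c1 : cnt ((0:Int) :: (List.replicate pre.length 0 ++ suf)) = cnt suf := by
      rw [cnt_cons, cnt_append, cnt_replicate]; simp
    rw [← hdecomp] at *
    simp only [c1, cnt_append, cnt_singleton, hcntenv]
    have hls : (List.replicate pre.length (0:Int) ++ suf).length = pre.length + suf.length := by simp
    rw [hls]
    have hel : ((env.length : Nat) : Int) = (pre.length : Int) + suf.length + 1 := by
      rw [hlen, hprelen]; push_cast; ring
    rw [hel]
    push_cast
    ring
  · simp only [vacuum]
    rw [if_neg hdir, if_neg hdir]
    rw [hdecomp, hloc] at hdir ⊢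
    rw [show ((l : Nat) : Int) = ((pre.length : Nat) : Int) by rw [hprelen]]
    rw [loopR suf pre cur 0 _ (by simp only [List.length_append, List.length_cons]; omega)]
    have e1 : pre ++ List.replicate (suf.length + 1) (0:Int)
        = (pre ++ List.replicate suf.length 0) ++ (0:Int) :: [] := by
      rw [List.replicate_succ', ← List.append_assoc]
    have e4 : ((pre.length + suf.length + 1 : Nat) : Int) + -1
        = (((pre ++ List.replicate suf.length (0:Int)).length : Nat) : Int) := by
      simp only [List.length_append, List.length_replicate]; push_cast; ring
    simp only []
    rw [e1, e4]
    rw [loopL (pre ++ List.replicate suf.length 0) 0 [] _ _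
        (by simp only [List.length_append, List.length_replicate, List.length_cons]; omega)]
    have c2 : cnt ((pre ++ List.replicate suf.length 0) ++ [(0:Int)]) = cnt pre := by
      rw [cnt_append, cnt_append, cnt_replicate, cnt_singleton]; simp
    rw [← hdecomp] at *
    simp only [c2, List.length_append, List.length_replicate]
    rw [show cur :: suf = [cur] ++ suf from rfl, cnt_append, hcntenv]
    have hel : ((env.length : Nat) : Int) = (pre.length : Int) + suf.length + 1 := by
      rw [hlen, hprelen]; push_cast; ring
    rw [hel]
    push_cast
    ring
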